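-- pv_equiv track=rewrite | github.com/thbaymet/python-intro | basics/easy_functions.py | is_typed_name
-- ===== SOURCE A (Python) =====
-- def is_typed_name(name, typed_name):
--     """
--     Defines whether "typed_name" is typed name of the "name"
--     https://www.geeksforgeeks.org/check-if-a-string-is-the-typed-name-of-the-given-name/
--     :param name: string, a name
--     :param typed_name: a typed name of the name
--     :return: True if type_named is typed name of the "name", False else
--     """
--     correct_index = 0
--     name_length = len(name)
--     for index, letter in enumerate(typed_name):
--         if index > 0 and (letter != typed_name[index - 1] or letter not in 'aeiou'):
--             correct_index += 1
--         if name_length <= correct_index or name[correct_index] != letter: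
--             return False
--     return True
-- ===== SOURCE B (Python) =====
-- def is_typed_name(name, typed_name):
--     # Phase 1: compress typed_name run by run (a vowel run collapses to one char,
--     # a consonant run is kept whole); Phase 2: compare the compressed sequence
--     # against the corresponding prefix of name.
--     compressed = []
--     i, n = 0, len(typed_name)
--     while i < n:
--         j = i
--         while j < n and typed_name[j] == typed_name[i]:
--             j += 1
--         if typed_name[i] in 'aeiou':
--             compressed.append(typed_name[i])
--         else:
--             compressed.extend(typed_name[i:j])
--         i = j
--     for index, ch in enumerate(compressed):
--         if index >= len(name) or name[index] != ch:
--             return False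
--     return True
-- ===== Notes on version B (the rewrite author's own statement) =====
-- stated objective: alternative
-- what changed: Replaces A's single fused scan (index/prev-char bookkeeping with a correct_index counter) by a two-phase decomposition: first compress typed_name run by run (collapse each vowel run to one character), then compare the compressed sequence as a prefix of name.
import Mathlib
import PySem

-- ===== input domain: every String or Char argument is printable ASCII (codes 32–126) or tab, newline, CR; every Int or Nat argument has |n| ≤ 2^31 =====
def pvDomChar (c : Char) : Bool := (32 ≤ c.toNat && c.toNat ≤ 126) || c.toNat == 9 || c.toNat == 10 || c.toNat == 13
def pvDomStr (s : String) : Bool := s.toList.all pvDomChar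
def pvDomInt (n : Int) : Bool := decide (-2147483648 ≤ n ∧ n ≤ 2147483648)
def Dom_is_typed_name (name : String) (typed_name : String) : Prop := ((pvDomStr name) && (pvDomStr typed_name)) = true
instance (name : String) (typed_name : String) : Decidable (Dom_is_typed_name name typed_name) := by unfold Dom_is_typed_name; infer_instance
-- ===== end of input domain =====

-- B replaces A's single fused scan (prev-index bookkeeping with a correct_index counter)
-- by a two-phase decomposition: compress typed_name run by run, then prefix-compare with name.

-- ===== PORT A =====
-- Python's `letter in 'aeiou'` (single-character membership)
def pvVowel (c : Char) : Bool := ['a', 'e', 'i', 'o', 'u'].contains c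

-- the enumerate loop of A: i = index, ci = correct_index, r = remaining letters of typed_name
def pvGoA (nl tl : List Char) (nlen : Int) : Nat → Int → List Char → Bool
  | _, _, [] => true
  | i, ci, letter :: rest =>
    let ci' := if 0 < i ∧ (PySem.List.pyGet? tl ((i : Int) - 1) ≠ some letter ∨ pvVowel letter = false)
               then ci + 1 else ci
    if nlen ≤ ci' ∨ PySem.List.pyGet? nl ci' ≠ some letter then false
    else pvGoA nl tl nlen (i + 1) ci' rest

def is_typed_name (name : String) (typed_name : String) : Bool :=
  pvGoA name.toList typed_name.toList (name.toList.length : Int) 0 0 typed_name.toList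

-- ===== PORT B =====
-- phase 1 of Source B: peel one run (the leading char and those equal to it) at a time
def pvCompress : List Char → List Char
  | [] => []
  | c :: l =>
    (if pvVowel c then [c] else c :: l.takeWhile (fun x => x == c)) ++
      pvCompress (l.dropWhile (fun x => x == c))
termination_by l => l.length
decreasing_by
  simp only [List.length_cons]
  exact Nat.lt_succ_of_le (List.length_dropWhile_le _ _)

-- phase 2 of Source B: compare compressed against name at growing index
def pvCmp (nl : List Char) (nlen : Int) : List Char → Int → Bool
  | [], _ => true
  | c :: cs, i =>
    if nlen ≤ i ∨ PySem.List.pyGet? nl i ≠ some c then false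
    else pvCmp nl nlen cs (i + 1)

def is_typed_name_alt (name : String) (typed_name : String) : Bool :=
  pvCmp name.toList (name.toList.length : Int) (pvCompress typed_name.toList) 0

-- ===== PRECONDITION & SPEC =====
def Spec_is_typed_name (name : String) (typed_name : String) (out : Bool) : Prop := out = is_typed_name_alt name typed_name
instance (name : String) (typed_name : String) (out : Bool) : Decidable (Spec_is_typed_name name typed_name out) := by unfold Spec_is_typed_name; infer_instance

-- ===== CLAIM (what is proved, stated in full; the proofs are below) =====
def Claim_equal_is_typed_name : Prop := ∀ (name : String) (typed_name : String), Dom_is_typed_name name typed_name → Spec_is_typed_name name typed_name (is_typed_name name typed_name)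

-- ===== LEMMAS AND PROOFS =====

-- prev-char reformulation of A's loop body (p = typed_name[index-1])
def pvGA (nl : List Char) (nlen : Int) : Char → Int → List Char → Bool
  | _, _, [] => true
  | p, ci, c :: l =>
    if c ≠ p ∨ pvVowel c = false then
      if nlen ≤ ci + 1 ∨ PySem.List.pyGet? nl (ci + 1) ≠ some c then false
      else pvGA nl nlen c (ci + 1) l
    else
      if nlen ≤ ci ∨ PySem.List.pyGet? nl ci ≠ some c then false
      else pvGA nl nlen c ci l

-- compression of a tail given the preceding char p: drop c iff c = p and c is a vowel
def pvCF : Char → List Char → List Char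
  | _, [] => []
  | p, c :: l => if c = p ∧ pvVowel c = true then pvCF c l else c :: pvCF c l

lemma pvGoA_cons (nl tl : List Char) (nlen : Int) (i : Nat) (ci : Int) (c : Char) (l : List Char) :
    pvGoA nl tl nlen i ci (c :: l) =
      (if 0 < i ∧ (PySem.List.pyGet? tl ((i : Int) - 1) ≠ some c ∨ pvVowel c = false) then
        if nlen ≤ ci + 1 ∨ PySem.List.pyGet? nl (ci + 1) ≠ some c then false
        else pvGoA nl tl nlen (i + 1) (ci + 1) l
      else
        if nlen ≤ ci ∨ PySem.List.pyGet? nl ci ≠ some c then false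
        else pvGoA nl tl nlen (i + 1) ci l) := by
  rw [pvGoA]
  by_cases h : 0 < i ∧ (PySem.List.pyGet? tl ((i : Int) - 1) ≠ some c ∨ pvVowel c = false) <;>
    simp [h]

lemma pvCompress_nil : pvCompress [] = [] := by rw [pvCompress.eq_def]

lemma pvCompress_cons (c : Char) (l : List Char) :
    pvCompress (c :: l) =
      (if pvVowel c then [c] else c :: l.takeWhile (fun x => x == c)) ++
        pvCompress (l.dropWhile (fun x => x == c)) := by
  rw [pvCompress.eq_def]

lemma pvGoA_eq_pvGA (nl : List Char) (nlen : Int) :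
    ∀ (l pre : List Char) (p : Char) (ci : Int),
      pvGoA nl (pre ++ p :: l) nlen (pre.length + 1) ci l = pvGA nl nlen p ci l := by
  intro l
  induction l with
  | nil => intro pre p ci; rfl
  | cons c l ih =>
    intro pre p ci
    have hget : PySem.List.pyGet? (pre ++ p :: (c :: l)) ((((pre.length + 1 : Nat)) : Int) - 1)
        = some p := by
      have h1 : (((pre.length + 1 : Nat)) : Int) - 1 = (pre.length : Int) := by push_cast; ring
      rw [h1, PySem.List.pyGet?_append_length]
    rw [pvGoA_cons, pvGA, hget]
    have hcond : (0 < pre.length + 1 ∧ (some p ≠ some c ∨ pvVowel c = false))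
        ↔ (c ≠ p ∨ pvVowel c = false) := by
      constructor
      · rintro ⟨-, h⟩; rcases h with h | h
        · exact Or.inl (fun hc => h (by rw [hc]))
        · exact Or.inr h
      · intro h; refine ⟨Nat.succ_pos _, ?_⟩
        rcases h with h | h
        · exact Or.inl (by simpa [eq_comm] using h)
        · exact Or.inr h
    rw [if_congr hcond rfl rfl]
    have hrec : ∀ ci'' : Int,
        pvGoA nl (pre ++ p :: (c :: l)) nlen (pre.length + 1 + 1) ci'' (c :: l).tail
          = pvGA nl nlen c ci'' l := by
      intro ci''
      have := ih (pre ++ [p]) c ci''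
      simpa [List.length_append, Nat.add_assoc] using this
    by_cases h : (c ≠ p ∨ pvVowel c = false)
    · rw [if_pos h, if_pos h]
      by_cases hg : nlen ≤ ci + 1 ∨ PySem.List.pyGet? nl (ci + 1) ≠ some c
      · rw [if_pos hg, if_pos hg]
      · rw [if_neg hg, if_neg hg]; exact hrec (ci + 1)
    · rw [if_neg h, if_neg h]
      by_cases hg : nlen ≤ ci ∨ PySem.List.pyGet? nl ci ≠ some c
      · rw [if_pos hg, if_pos hg]
      · rw [if_neg hg, if_neg hg]; exact hrec ci

lemma pyGet?_some_lt (nl : List Char) (i : Int) (x : Char) (h0 : 0 ≤ i)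
    (h : PySem.List.pyGet? nl i = some x) : i < (nl.length : Int) := by
  rw [PySem.List.pyGet?_of_nonneg] at h
  · obtain ⟨hlt, -⟩ := List.getElem?_eq_some_iff.mp h
    omega
  · exact h0

lemma pvGA_eq_pvCmp (nl : List Char) :
    ∀ (l : List Char) (p : Char) (ci : Int), 0 ≤ ci →
      PySem.List.pyGet? nl ci = some p →
      pvGA nl (nl.length : Int) p ci l = pvCmp nl (nl.length : Int) (pvCF p l) (ci + 1) := by
  intro l
  induction l with
  | nil => intro p ci _ _; rfl
  | cons c l ih =>
    intro p ci h0 hp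
    by_cases hv : c = p ∧ pvVowel c = true
    · -- vowel repeat: A keeps ci, its check passes against name[ci]; B dropped the char
      obtain ⟨rfl, hvv⟩ := hv
      have hcond : ¬ (c ≠ c ∨ pvVowel c = false) := by simp [hvv]
      have hlt : ci < (nl.length : Int) := pyGet?_some_lt nl ci c h0 hp
      rw [pvGA, if_neg hcond]
      have hg : ¬ ((nl.length : Int) ≤ ci ∨ PySem.List.pyGet? nl ci ≠ some c) := by
        push Not; exact ⟨by omega, hp⟩
      rw [if_neg hg, pvCF, if_pos ⟨rfl, hvv⟩]
      exact ih c ci h0 hp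
    · -- kept char: both advance to ci+1 and compare name[ci+1] with c
      have hcond : (c ≠ p ∨ pvVowel c = false) := by
        by_cases h1 : c = p
        · cases hb : pvVowel c
          · exact Or.inr rfl
          · exact absurd ⟨h1, hb⟩ hv
        · exact Or.inl h1
      rw [pvGA, if_pos hcond, pvCF, if_neg hv, pvCmp]
      by_cases hg : (nl.length : Int) ≤ ci + 1 ∨ PySem.List.pyGet? nl (ci + 1) ≠ some c
      · rw [if_pos hg, if_pos hg]
      · rw [if_neg hg, if_neg hg]
        push Not at hg
        exact ih c (ci + 1) (by omega) hg.2

lemma pvCompress_eq_pvCF : ∀ (l : List Char) (c : Char),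
    pvCompress (c :: l) = c :: pvCF c l := by
  intro l
  induction l with
  | nil =>
    intro c
    rw [pvCompress_cons]
    by_cases h : pvVowel c = true <;> simp [h, pvCF, pvCompress_nil]
  | cons d l ih =>
    intro c
    by_cases hd : d = c
    · subst hd
      by_cases hv : pvVowel d = true
      · rw [pvCompress_cons]
        simp only [hv, if_true, List.takeWhile_cons, List.dropWhile_cons, BEq.rfl, if_true]
        have hcf : pvCF d (d :: l) = pvCF d l := by rw [pvCF]; simp [hv]
        rw [hcf]
        have := ih d
        rw [pvCompress_cons] at this
        simpa [hv] using this
      · rw [pvCompress_cons]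
        simp only [hv, List.takeWhile_cons, List.dropWhile_cons, BEq.rfl, if_true]
        have hcf : pvCF d (d :: l) = d :: pvCF d l := by
          rw [pvCF]; simp [hv]
        rw [hcf]
        have := ih d
        rw [pvCompress_cons] at this
        simp only [hv] at this
        simpa using this
    · have hne : (d == c) = false := by simp [hd]
      rw [pvCompress_cons]
      simp only [List.takeWhile_cons, List.dropWhile_cons, hne, Bool.false_eq_true, if_false]
      have hcf : pvCF c (d :: l) = d :: pvCF d l := by
        rw [pvCF]; simp [hd]
      rw [hcf, ih d]
      by_cases hvv : pvVowel c = true <;> simp [hvv]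

-- ===== VERDICT (by name: the statement is the Claim_ definition above) =====
theorem is_typed_name_spec : Claim_equal_is_typed_name := by
  intro name typed_name _
  unfold Spec_is_typed_name is_typed_name is_typed_name_alt
  cases htl : typed_name.toList with
  | nil => rw [pvCompress_nil]; rfl
  | cons c l =>
    rw [pvCompress_eq_pvCF, pvGoA_cons, pvCmp]
    rw [if_neg (by simp : ¬ (0 < (0:Nat) ∧ (PySem.List.pyGet? (c :: l) (((0:Nat) : Int) - 1) ≠ some c ∨ pvVowel c = false)))]
    by_cases hg : (name.toList.length : Int) ≤ 0 ∨ PySem.List.pyGet? name.toList 0 ≠ some c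
    · rw [if_pos hg, if_pos hg]
    · rw [if_neg hg, if_neg hg]
      push Not at hg
      have h1 : pvGoA name.toList (c :: l) (name.toList.length : Int) (0 + 1) 0 l
          = pvGA name.toList (name.toList.length : Int) c 0 l := by
        have := pvGoA_eq_pvGA name.toList (name.toList.length : Int) l [] c 0
        simpa using this
      have h2 := pvGA_eq_pvCmp name.toList l c 0 le_rfl hg.2
      rw [h1, h2]
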